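-- pv_equiv track=rewrite | github.com/massey101/bclock | scripts/font_encoder.py | to_hex_format
-- ===== SOURCE A (Python) =====
-- import math
--
-- def to_hex_format(px, w, h):
--     hex_width = math.ceil(w / 8)
--     output = []
--     for y in range(h):
--         row = [0] * hex_width
--         for x in range(w):
--             if not px[y][x]:
--                 row[math.floor(x / 8)] |= 1 << (7 - (x % 8))
--         output.append(row)
--
--     return output
-- ===== SOURCE B (Python) =====
-- def to_hex_format(px, w, h):
--     hex_width = (w + 7) // 8 if w > 0 else 0
--     output = []
--     for y in range(h):
--         prow = px[y][:w] if w > 0 else []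
--         row = []
--         for i in range(hex_width):
--             chunk = prow[8 * i:8 * i + 8]
--             byte = 0
--             for v in chunk:
--                 byte = byte * 2 + (0 if v else 1)
--             row.append(byte * 2 ** (8 - len(chunk)))
--         output.append(row)
--     return output
-- ===== Notes on version B (the rewrite author's own statement) =====
-- stated objective: alternative
-- what changed: B slices each pixel row into 8-pixel chunks and folds each chunk into its byte Horner-style (byte = byte*2 + bit, with a final power-of-two pad for a short last chunk), instead of A's preallocated zero row updated in place by OR-ing shifted bit masks at index floor(x/8).
import Mathlib
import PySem

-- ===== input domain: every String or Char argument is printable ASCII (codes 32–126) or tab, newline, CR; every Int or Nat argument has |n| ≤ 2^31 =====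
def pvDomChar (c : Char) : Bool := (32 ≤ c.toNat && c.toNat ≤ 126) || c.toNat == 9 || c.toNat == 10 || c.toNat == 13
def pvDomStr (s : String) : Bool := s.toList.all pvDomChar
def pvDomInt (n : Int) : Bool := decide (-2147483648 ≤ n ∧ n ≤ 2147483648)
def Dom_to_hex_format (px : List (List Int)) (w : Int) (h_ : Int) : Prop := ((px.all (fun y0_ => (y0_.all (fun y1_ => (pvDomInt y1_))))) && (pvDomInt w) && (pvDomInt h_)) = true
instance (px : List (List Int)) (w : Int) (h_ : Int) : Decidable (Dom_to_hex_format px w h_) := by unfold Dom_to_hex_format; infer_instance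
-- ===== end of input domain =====

-- B repacks each pixel row by slicing it into 8-pixel chunks and folding each chunk
-- into its byte Horner-style (byte*2 + bit, then a final power-of-two pad), instead of
-- A's preallocated zero row updated in place with OR-ed bit masks at computed indices.

-- ===== PORT A =====
-- loop body of A's inner `for x in range(w)`:
--   `if not px[y][x]: row[math.floor(x/8)] |= 1 << (7 - (x % 8))`
-- px[y][x] is ported as getD (in range on every input admitted by Pre_);
-- `not v` on an int is `v == 0`; floor(x/8) and x % 8 on the Nat x are exact;
-- `|=` is PySem.Int.bor; `1 << k` is `1 <<< k`.
def pvStepA (pxy : List Int) (row : List Int) (x : Nat) : List Int :=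
  if pxy.getD x 1 == 0 then
    row.set (x / 8) (PySem.Int.bor (row.getD (x / 8) 0) ((1 : Int) <<< (7 - x % 8)))
  else row

-- `row = [0] * hex_width; for x in range(w): …` ([0]*k is empty for k ≤ 0, as toNat gives)
def pvRowA (pxy : List Int) (w : Int) (hexw : Int) : List Int :=
  (List.range w.toNat).foldl (pvStepA pxy) (List.replicate hexw.toNat 0)

-- math.ceil(w / 8) = (w + 7) // 8 for every int w (the float division is exact on Dom_)
def to_hex_format (px : List (List Int)) (w : Int) (h_ : Int) : List (List Int) :=
  let hex_width : Int := PySem.Int.floordiv (w + 7) 8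
  (List.range h_.toNat).foldl (fun output y => output ++ [pvRowA (px.getD y []) w hex_width]) []

-- ===== PORT B =====
-- `byte = 0; for v in chunk: byte = byte * 2 + (0 if v else 1)`, then `byte * 2 ** (8 - len(chunk))`
def pvByteB (chunk : List Int) : Int :=
  (chunk.foldl (fun byte v => byte * 2 + (if v == 0 then 1 else 0)) 0) * 2 ^ (8 - chunk.length)

-- `row = []; for i in range(hex_width): chunk = prow[8*i : 8*i+8]; … row.append(…)`
def pvRowB (prow : List Int) (hexw : Nat) : List Int :=
  (List.range hexw).foldl (fun row (i : Nat) =>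
    row ++ [pvByteB (PySem.List.slice prow (some (8 * (i : Int))) (some (8 * (i : Int) + 8)))]) []

-- `hex_width = (w + 7) // 8 if w > 0 else 0`; `prow = px[y][:w] if w > 0 else []`
-- (px[y] is ported as getD; under Pre_ it is in range whenever it is evaluated)
def to_hex_format_alt (px : List (List Int)) (w : Int) (h_ : Int) : List (List Int) :=
  let hex_width : Int := if 0 < w then PySem.Int.floordiv (w + 7) 8 else 0
  (List.range h_.toNat).foldl (fun output y =>
    output ++ [pvRowB (if 0 < w then PySem.List.slice (px.getD y []) none (some w) else [])
                 hex_width.toNat]) []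

-- ===== PRECONDITION & SPEC =====
-- Pre_ is exactly where A returns: when w > 0 and h > 0, A indexes px[y][x] for every
-- y < h, x < w, so it raises IndexError unless px has at least h rows and each of the
-- first h rows has at least w entries; for w ≤ 0 or h ≤ 0 A indexes nothing.
def Pre_to_hex_format (px : List (List Int)) (w : Int) (h_ : Int) : Prop :=
  w ≤ 0 ∨ h_ ≤ 0 ∨ ((h_ ≤ (px.length : Int)) ∧ ∀ r ∈ px.take h_.toNat, w ≤ (r.length : Int))
instance (px : List (List Int)) (w : Int) (h_ : Int) : Decidable (Pre_to_hex_format px w h_) := by unfold Pre_to_hex_format; infer_instance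

def pvWitness_to_hex_format : List (List Int) × Int × Int :=
  ([[0, 1, 0, 1, 0, 1, 0, 1, 1], [1, 0, 0, 0, 0, 0, 0, 0, 0]], 9, 2)

def Spec_to_hex_format (px : List (List Int)) (w : Int) (h_ : Int) (out : List (List Int)) : Prop := out = to_hex_format_alt px w h_
instance (px : List (List Int)) (w : Int) (h_ : Int) (out : List (List Int)) : Decidable (Spec_to_hex_format px w h_ out) := by unfold Spec_to_hex_format; infer_instance

-- ===== CLAIM (what is proved, stated in full; the proofs are below) =====
def Claim_equal_to_hex_format : Prop := ∀ (px : List (List Int)) (w : Int) (h_ : Int), Dom_to_hex_format px w h_ → Pre_to_hex_format px w h_ → Spec_to_hex_format px w h_ (to_hex_format px w h_)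

-- ===== LEMMAS AND PROOFS =====

-- The pixel bit: 1 when the pixel is zero (falsy), else 0.
def pvBit (pxy : List Int) (x : Nat) : Nat := if pxy.getD x 1 = 0 then 1 else 0

-- Closed form of byte i after the first m pixels have been processed.
def pvP (pxy : List Int) (i m : Nat) : Nat :=
  ∑ b ∈ Finset.range 8, if 8 * i + b < m then pvBit pxy (8 * i + b) * 2 ^ (7 - b) else 0

theorem pv_lor_pow (k c : Nat) : (2 ^ (k + 1) * c) ||| 2 ^ k = 2 ^ (k + 1) * c + 2 ^ k := by
  apply Nat.eq_of_testBit_eq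
  intro j
  rw [Nat.testBit_lor]
  have h1 : 2 ^ (k + 1) * c = c <<< (k + 1) := by rw [Nat.shiftLeft_eq]; ring
  have h2 : 2 ^ (k + 1) * c + 2 ^ k = (2 * c + 1) <<< k := by rw [Nat.shiftLeft_eq]; ring
  rw [h2, h1, Nat.testBit_shiftLeft, Nat.testBit_shiftLeft, Nat.testBit_two_pow]
  rcases lt_trichotomy j k with h | rfl | h
  · simp [show ¬ j ≥ k + 1 by omega, show ¬ j ≥ k by omega, show k ≠ j by omega]
  · simp
  · have e3 : j - k = (j - (k + 1)) + 1 := by omega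
    simp only [show j ≥ k + 1 by omega, show j ≥ k by omega, decide_true, Bool.true_and, e3,
      Nat.testBit_add_one, show k ≠ j by omega, decide_false, Bool.or_false]
    congr 1
    omega

theorem pv_foldl_snoc {α β : Type} (f : α → β) (l : List α) (acc : List β) :
    l.foldl (fun out a => out ++ [f a]) acc = acc ++ l.map f := by
  induction l generalizing acc with
  | nil => simp
  | cons a t ih => simp [ih]

theorem pv_getD_map_range (n j : Nat) (f : Nat → Int) (hj : j < n) :
    (((List.range n).map f).getD j 0) = f j := by
  rw [List.getD_eq_getElem _ _ (by simpa using hj)]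
  simp

theorem pv_set_map_range (n j : Nat) (f g : Nat → Int) (v : Int) (hj : j < n)
    (hfg : ∀ i, i < n → i ≠ j → f i = g i) (hv : g j = v) :
    ((List.range n).map f).set j v = (List.range n).map g := by
  apply List.ext_getElem (by simp)
  intro i h1 h2
  have hi : i < n := by simpa using h2
  by_cases hij : i = j
  · subst hij
    rw [List.getElem_set_self (by simpa using hj)]
    simp [hv]
  · rw [List.getElem_set_ne (by omega)]
    simp [hfg i hi hij]

theorem pvP_zero (pxy : List Int) (i : Nat) : pvP pxy i 0 = 0 := by
  simp [pvP]

theorem pvP_succ_ne (pxy : List Int) (i m : Nat) (hi : i ≠ m / 8) :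
    pvP pxy i (m + 1) = pvP pxy i m := by
  apply Finset.sum_congr rfl
  intro b hb
  have hb8 : b < 8 := Finset.mem_range.mp hb
  have hne : 8 * i + b ≠ m := by omega
  by_cases h : 8 * i + b < m
  · simp [h, show 8 * i + b < m + 1 by omega]
  · simp [h, show ¬ 8 * i + b < m + 1 by omega]

theorem pvP_succ_self (pxy : List Int) (m : Nat) :
    pvP pxy (m / 8) (m + 1) = pvP pxy (m / 8) m + pvBit pxy m * 2 ^ (7 - m % 8) := by
  have key : ∀ b ∈ Finset.range 8,
      (if 8 * (m / 8) + b < m + 1 then pvBit pxy (8 * (m / 8) + b) * 2 ^ (7 - b) else 0)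
      = (if 8 * (m / 8) + b < m then pvBit pxy (8 * (m / 8) + b) * 2 ^ (7 - b) else 0)
        + (if b = m % 8 then pvBit pxy m * 2 ^ (7 - m % 8) else 0) := by
    intro b hb
    have hb8 : b < 8 := Finset.mem_range.mp hb
    by_cases hbm : b = m % 8
    · subst hbm
      have he : 8 * (m / 8) + m % 8 = m := by omega
      rw [he]
      simp [show m < m + 1 by omega]
    · have hne : 8 * (m / 8) + b ≠ m := by omega
      by_cases h : 8 * (m / 8) + b < m
      · simp [h, show 8 * (m / 8) + b < m + 1 by omega, hbm]
      · simp [h, show ¬ 8 * (m / 8) + b < m + 1 by omega, hbm]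
  unfold pvP
  rw [Finset.sum_congr rfl key, Finset.sum_add_distrib,
    Finset.sum_ite_eq' (Finset.range 8) (m % 8) (fun _ => pvBit pxy m * 2 ^ (7 - m % 8)),
    if_pos (Finset.mem_range.mpr (show m % 8 < 8 by omega))]

theorem pvP_dvd (pxy : List Int) (m : Nat) :
    2 ^ (7 - m % 8 + 1) ∣ pvP pxy (m / 8) m := by
  apply Finset.dvd_sum
  intro b hb
  have hb8 : b < 8 := Finset.mem_range.mp hb
  by_cases h : 8 * (m / 8) + b < m
  · have hblt : b < m % 8 := by omega
    rw [if_pos h]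
    exact Dvd.dvd.mul_left (pow_dvd_pow 2 (by omega)) _
  · simp [h]

-- one inner-loop bit-set step of A, on the closed form
theorem pv_bor_step (pxy : List Int) (m : Nat) (hbit : pxy.getD m 1 = 0) :
    PySem.Int.bor ((pvP pxy (m / 8) m : Nat) : Int) ((1 : Int) <<< (7 - m % 8))
      = ((pvP pxy (m / 8) (m + 1) : Nat) : Int) := by
  obtain ⟨c, hc⟩ := pvP_dvd pxy m
  have h1 : (1 : Int) <<< (7 - m % 8) = ((2 ^ (7 - m % 8) : Nat) : Int) := by
    simp [Int.shiftLeft_eq]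
  rw [h1, PySem.Int.bor_natCast, hc, pv_lor_pow, pvP_succ_self, ← hc]
  simp only [pvBit, if_pos hbit, one_mul]

-- A's inner loop computes the closed form pvP
theorem pv_rowA_fold (pxy : List Int) (n : Nat) :
    ∀ m, m ≤ 8 * n →
    (List.range m).foldl (pvStepA pxy) (List.replicate n 0)
      = (List.range n).map (fun i => ((pvP pxy i m : Nat) : Int)) := by
  intro m
  induction m with
  | zero =>
    intro _
    simp [pvP_zero]
  | succ m ih =>
    intro hm
    rw [List.range_succ, List.foldl_append, ih (by omega), List.foldl_cons, List.foldl_nil]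
    unfold pvStepA
    have hdiv : m / 8 < n := by omega
    by_cases hbit : pxy.getD m 1 = 0
    · rw [if_pos (by simp only [beq_iff_eq]; exact hbit)]
      rw [pv_getD_map_range n (m / 8) _ hdiv]
      apply pv_set_map_range n (m / 8) _ _ _ hdiv
      · intro i hi hne
        rw [pvP_succ_ne pxy i m hne]
      · exact (pv_bor_step pxy m hbit).symm
    · rw [if_neg (by simp only [beq_iff_eq]; exact hbit)]
      apply List.map_congr_left
      intro i hi
      have hi' : i < n := by simpa using hi
      by_cases hie : i = m / 8
      · subst hie
        rw [pvP_succ_self]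
        simp only [pvBit, if_neg hbit, zero_mul, add_zero]
      · rw [pvP_succ_ne pxy i m hie]

-- value of B's Horner fold
def pvV : List Int → Int
  | [] => 0
  | v :: t => (if v == 0 then 1 else 0) * 2 ^ t.length + pvV t

theorem pv_horner (l : List Int) (acc : Int) :
    l.foldl (fun byte v => byte * 2 + (if v == 0 then 1 else 0)) acc
      = acc * 2 ^ l.length + pvV l := by
  induction l generalizing acc with
  | nil => simp [pvV]
  | cons v t ih =>
    rw [List.foldl_cons, ih, pvV, List.length_cons, pow_succ]
    ring

theorem pvV_sum (l : List Int) :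
    pvV l = ∑ j ∈ Finset.range l.length,
      (if l.getD j 1 = 0 then 1 else 0) * 2 ^ (l.length - 1 - j) := by
  induction l with
  | nil => simp [pvV]
  | cons v t ih =>
    rw [pvV, ih, List.length_cons, Finset.sum_range_succ', add_comm]
    congr 1
    · apply Finset.sum_congr rfl
      intro j _
      rw [List.getD_cons_succ,
        show t.length + 1 - 1 - (j + 1) = t.length - 1 - j from by omega]
    · rw [List.getD_cons_zero]
      simp only [beq_iff_eq, Nat.add_sub_cancel, Nat.sub_zero]

-- B's byte i equals the closed form pvP, for i < hex_width
theorem pv_byteB_eq (pxy : List Int) (W n i : Nat) (hW : W ≤ pxy.length)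
    (hn : n = (W + 7) / 8) (hi : i < n) :
    pvByteB (PySem.List.slice (pxy.take W) (some (8 * (i : Int))) (some (8 * (i : Int) + 8)))
      = ((pvP pxy i W : Nat) : Int) := by
  have hsl : PySem.List.slice (pxy.take W) (some (8 * (i : Int))) (some (8 * (i : Int) + 8))
      = ((pxy.take W).drop (8 * i)).take 8 := by
    have : (8 * (i : Int)) = ((8 * i : Nat) : Int) := by push_cast; ring
    rw [this, show ((8 * i : Nat) : Int) + 8 = (((8 * i + 8) : Nat) : Int) by push_cast; ring,
      PySem.List.slice_natCast]
    congr 1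
    omega
  rw [hsl]
  set chunk := ((pxy.take W).drop (8 * i)).take 8 with hchunk
  have hplen : (pxy.take W).length = W := by simp; omega
  have hL : chunk.length = min 8 (W - 8 * i) := by
    rw [hchunk]; simp [hplen]
  have hiW : 8 * i < W := by omega
  have hL8 : chunk.length ≤ 8 := by rw [hL]; omega
  have hLlt : ∀ j, j < chunk.length → j < 8 ∧ 8 * i + j < W := by
    intro j hj
    rw [hL] at hj
    omega
  have hgd : ∀ j, j < chunk.length → chunk.getD j 1 = pxy.getD (8 * i + j) 1 := by
    intro j hj
    obtain ⟨hj8, hjW⟩ := hLlt j hj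
    have h1 : chunk[j]? = pxy[8 * i + j]? := by
      rw [hchunk]
      simp [List.getElem?_drop, hj8, hjW]
    rw [List.getD_eq_getElem?_getD, List.getD_eq_getElem?_getD, h1]
  unfold pvByteB
  rw [pv_horner, pvV_sum]
  push_cast [pvP]
  rw [zero_mul, zero_add, Finset.sum_mul]
  rw [← Finset.sum_subset (show Finset.range chunk.length ⊆ Finset.range 8 by
      intro x hx
      simp only [Finset.mem_range] at hx ⊢
      omega)
    (by
      intro b hbmem hb
      have hb8 : b < 8 := Finset.mem_range.mp hbmem
      have hbL : ¬ b < chunk.length := fun h => hb (Finset.mem_range.mpr h)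
      rw [hL] at hbL
      have : ¬ 8 * i + b < W := by omega
      simp [this])]
  apply Finset.sum_congr rfl
  intro j hj
  have hjL : j < chunk.length := Finset.mem_range.mp hj
  rw [hgd j hjL]
  rw [if_pos (hLlt j hjL).2]
  have hpow : (2 : Int) ^ (chunk.length - 1 - j) * 2 ^ (8 - chunk.length) = 2 ^ (7 - j) := by
    rw [← pow_add]
    congr 1
    omega
  rw [mul_assoc, hpow]
  unfold pvBit
  by_cases hz : pxy.getD (8 * i + j) 1 = 0
  · rw [if_pos hz, if_pos hz]
    simp
  · rw [if_neg hz, if_neg hz]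
    simp

-- per-row equality in the main (w > 0, row long enough) case
theorem pv_row_eq (pxy : List Int) (w : Int) (hw : 0 < w) (hlen : w ≤ (pxy.length : Int)) :
    pvRowA pxy w (PySem.Int.floordiv (w + 7) 8)
      = pvRowB (PySem.List.slice pxy none (some w)) (PySem.Int.floordiv (w + 7) 8).toNat := by
  set W := w.toNat with hWdef
  have hwW : w = (W : Int) := by omega
  have hfd : PySem.Int.floordiv (w + 7) 8 = (((W + 7) / 8 : Nat) : Int) := by
    rw [hwW, show ((W : Int) + 7) = (((W + 7) : Nat) : Int) by push_cast; ring]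
    exact_mod_cast PySem.Int.floordiv_natCast (W + 7) 8
  set n := (W + 7) / 8 with hn
  have hWn : W ≤ 8 * n := by omega
  have hW0 : 0 < W := by omega
  have hWlen : W ≤ pxy.length := by omega
  have hA : pvRowA pxy w (PySem.Int.floordiv (w + 7) 8)
      = (List.range n).map (fun i => ((pvP pxy i W : Nat) : Int)) := by
    unfold pvRowA
    rw [hfd, show ((((W + 7) / 8 : Nat) : Int)).toNat = n by omega]
    exact pv_rowA_fold pxy n W hWn
  have hB : pvRowB (PySem.List.slice pxy none (some w)) (PySem.Int.floordiv (w + 7) 8).toNat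
      = (List.range n).map (fun (i : Nat) =>
          pvByteB (PySem.List.slice (pxy.take W) (some (8 * (i : Int)))
            (some (8 * (i : Int) + 8)))) := by
    rw [PySem.List.slice_to pxy (by omega), hfd,
      show ((((W + 7) / 8 : Nat) : Int)).toNat = n by omega]
    unfold pvRowB
    rw [pv_foldl_snoc, List.nil_append]
  rw [hA, hB]
  apply List.map_congr_left
  intro i hi
  exact (pv_byteB_eq pxy W n i hWlen hn (by simpa using hi)).symm

-- degenerate case w ≤ 0: both rows are empty
theorem pv_row_eq_nonpos (pxy : List Int) (w : Int) (hw : w ≤ 0) :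
    pvRowA pxy w (PySem.Int.floordiv (w + 7) 8) = pvRowB [] 0 := by
  have hW : w.toNat = 0 := by omega
  have hfd : PySem.Int.floordiv (w + 7) 8 ≤ 0 := by
    have := (PySem.Int.floordiv_lt_iff_lt_mul (a := w + 7) (b := 8) (q := 1) (by omega)).mpr
      (by omega)
    omega
  have : (PySem.Int.floordiv (w + 7) 8).toNat = 0 := by omega
  unfold pvRowA pvRowB
  rw [hW, this]
  simp

-- ===== VERDICT (by name: the statement is the Claim_ definition above) =====
theorem to_hex_format_spec : Claim_equal_to_hex_format := by
  intro px w h_ _ hpre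
  show to_hex_format px w h_ = to_hex_format_alt px w h_
  unfold to_hex_format to_hex_format_alt
  rw [pv_foldl_snoc, pv_foldl_snoc, List.nil_append, List.nil_append]
  apply List.map_congr_left
  intro y hy
  have hy' : y < h_.toNat := by simpa using hy
  by_cases hw : 0 < w
  · rcases hpre with hple | hhle | ⟨hh, hrows⟩
    · omega
    · omega
    · have hylen : y < px.length := by omega
      have hmem : px[y] ∈ px.take h_.toNat := by
        have : (px.take h_.toNat)[y]'(by simp; omega) = px[y] := List.getElem_take
        rw [← this]
        exact List.getElem_mem _
      have hlen : w ≤ ((px[y]).length : Int) := hrows _ hmem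
      have hgd : px.getD y [] = px[y] := List.getD_eq_getElem px [] hylen
      rw [hgd, if_pos hw, if_pos hw]
      exact pv_row_eq px[y] w hw hlen
  · rw [if_neg hw, if_neg hw]
    simpa using pv_row_eq_nonpos (px.getD y []) w (by omega)
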